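-- pv_equiv track=rewrite | github.com/shuichengyy5/xxx | 4_main.py | arrange_device
-- ===== SOURCE A (Python) =====
-- def arrange_device(bank):
--     m=len(bank)
--     n=len(bank[0])
--     laser=0
--
--     for i in range(m):
--         devices_i = [j for j in range(n) if bank[i][j] == '1']
--
--         for k in range(i + 1, m):
--             devices_k = [j for j in range(n) if bank[k][j] == '1']
--
--             if devices_i and devices_k:
--                 valid_device = True
--
--                 for l in range(i + 1, k):
--
--                     if any(bank[l][j] == '1' for j in range(n)):
--                         valid_device = False
--                         break
--
--                 if valid_device:
--                     laser += len(devices_i) * len(devices_k)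
--
--     return laser
-- ===== SOURCE B (Python) =====
-- def arrange_device(bank):
--     n = len(bank[0])
--     total = 0
--     prev = 0
--     for row in bank:
--         c = sum(row[j] == '1' for j in range(n))
--         if c:
--             total += prev * c
--             prev = c
--     return total
-- ===== Notes on version B (the rewrite author's own statement) =====
-- stated objective: faster
-- what changed: A enumerates all row pairs (i,k) and rescans every row in between for each pair; B makes a single left-to-right pass keeping the previous non-empty row's device count and adding prev*current at each non-empty row.
import Mathlib
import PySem

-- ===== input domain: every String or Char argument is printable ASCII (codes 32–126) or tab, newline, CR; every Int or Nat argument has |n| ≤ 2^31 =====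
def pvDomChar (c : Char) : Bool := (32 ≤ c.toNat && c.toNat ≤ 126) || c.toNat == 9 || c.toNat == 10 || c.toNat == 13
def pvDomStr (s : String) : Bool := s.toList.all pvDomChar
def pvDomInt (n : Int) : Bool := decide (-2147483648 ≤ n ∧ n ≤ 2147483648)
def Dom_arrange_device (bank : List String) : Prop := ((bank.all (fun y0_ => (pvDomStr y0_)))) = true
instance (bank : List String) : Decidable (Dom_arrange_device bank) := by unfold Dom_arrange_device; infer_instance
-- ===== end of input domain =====

-- B replaces A's O(m^2·n) pair enumeration by a single left-to-right pass that keeps the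
-- previous non-empty row's device count and multiplies it with each new non-empty row's count.

-- ===== PORT A =====
-- devices_i = [j for j in range(n) if bank[i][j] == '1']
def pvDevRow (bank : List String) (n i : Int) : List Int :=
  (PySem.List.pyRange 0 n).filter (fun j =>
    PySem.Str.pyGet? ((PySem.List.pyGet? bank i).getD "") j == some '1')

def arrange_device (bank : List String) : Int :=
  let m : Int := PySem.List.len bank
  let n : Int := PySem.Str.len ((PySem.List.pyGet? bank 0).getD "")
  (PySem.List.pyRange 0 m).foldl (fun laser i =>
    let devices_i := pvDevRow bank n i
    (PySem.List.pyRange (i + 1) m).foldl (fun laser k =>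
      let devices_k := pvDevRow bank n k
      if !devices_i.isEmpty && !devices_k.isEmpty then
        -- the l-loop with break: valid_device ↔ no row strictly between i and k has a '1'
        let valid_device := (PySem.List.pyRange (i + 1) k).all (fun l =>
          !((PySem.List.pyRange 0 n).any (fun j =>
            PySem.Str.pyGet? ((PySem.List.pyGet? bank l).getD "") j == some '1')))
        if valid_device then laser + (devices_i.length : Int) * (devices_k.length : Int)
        else laser
      else laser) laser) 0

-- ===== PORT B =====
def arrange_device_alt (bank : List String) : Int :=
  let n : Int := PySem.Str.len ((PySem.List.pyGet? bank 0).getD "")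
  (bank.foldl (fun (acc : Int × Int) row =>
    -- c = sum(row[j] == '1' for j in range(n)); acc = (total, prev)
    let c : Int := ((PySem.List.pyRange 0 n).map
      (fun j => if PySem.Str.pyGet? row j == some '1' then (1 : Int) else 0)).sum
    if c ≠ 0 then (acc.1 + acc.2 * c, c) else acc) (0, 0)).1

-- ===== PRECONDITION & SPEC =====
-- Pre_ excludes exactly the inputs on which A raises: the empty list (bank[0] is an
-- IndexError) and banks where some row is shorter than the first row (bank[i][j] raises;
-- B raises IndexError there too).
def Pre_arrange_device (bank : List String) : Prop :=
  bank ≠ [] ∧ ∀ row ∈ bank, PySem.Str.len (bank.headD "") ≤ PySem.Str.len row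
instance (bank : List String) : Decidable (Pre_arrange_device bank) := by
  unfold Pre_arrange_device; infer_instance

def pvWitness_arrange_device : List String := ["011", "000", "110"]

def Spec_arrange_device (bank : List String) (out : Int) : Prop := out = arrange_device_alt bank
instance (bank : List String) (out : Int) : Decidable (Spec_arrange_device bank out) := by
  unfold Spec_arrange_device; infer_instance

-- ===== CLAIM (what is proved, stated in full; the proofs are below) =====
def Claim_equal_arrange_device : Prop := ∀ (bank : List String), Dom_arrange_device bank →
  Pre_arrange_device bank → Spec_arrange_device bank (arrange_device bank)

-- ===== LEMMAS AND PROOFS =====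

-- per-row count of '1' among the first n characters — what both programs count per row
def pvCnt (n : Nat) (row : String) : Int := ((row.toList.take n).filter (· == '1')).length

lemma pv_filter_range_len (cs : List Char) (n : Nat) (hn : n ≤ cs.length) :
    (((PySem.List.pyRange 0 (n : Int)).filter
        (fun j => PySem.List.pyGet? cs j == some '1')).length : Int)
      = ((cs.take n).filter (· == '1')).length := by
  induction n with
  | zero => simp [PySem.List.pyRange_one_eq_nil]
  | succ k ih =>
    have hk : k ≤ cs.length := by omega
    have hlt : k < cs.length := by omega
    rw [show ((k+1 : Nat) : Int) = (k : Int) + 1 by push_cast; ring,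
      PySem.List.pyRange_one_succ_right (by positivity), List.filter_append,
      List.length_append, List.take_succ, List.filter_append, List.length_append]
    push_cast
    rw [← ih hk]
    have hget : cs[k]? = some cs[k] := List.getElem?_eq_getElem hlt
    by_cases h : cs[k] = '1'
    · simp [List.filter, PySem.List.pyGet?_natCast, hget, h]
    · have hb : (cs[k] == '1') = false := by simp [h]
      simp [List.filter, PySem.List.pyGet?_natCast, hget, hb]

lemma pv_devRow_len (bank : List String) (nN : Nat)
    (hlen : ∀ row ∈ bank, nN ≤ row.toList.length) (i : Int)
    (h0 : 0 ≤ i) (hm : i < bank.length) :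
    ((pvDevRow bank (nN : Int) i).length : Int) = (bank.map (pvCnt nN)).getD i.toNat 0 := by
  have hlt : i.toNat < bank.length := by omega
  have hrow : PySem.List.pyGet? bank i = some bank[i.toNat] :=
    PySem.List.pyGet?_eq_some_getElem bank h0 (by push_cast; omega)
  unfold pvDevRow
  rw [hrow]
  simp only [Option.getD_some]
  have := pv_filter_range_len (bank[i.toNat]).toList nN (hlen _ (List.getElem_mem hlt))
  simp only [PySem.Str.pyGet?_eq, PySem.Chars.pyGet?_eq_listPyGet?] at *
  rw [this]
  simp [pvCnt, List.getD, List.getElem?_map, List.getElem?_eq_getElem hlt]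

def pvFirstNZ : List Int → Int
  | [] => 0
  | c :: t => if c ≠ 0 then c else pvFirstNZ t

def pvPairs : List Int → Int
  | [] => 0
  | c :: t => (if c ≠ 0 then c * pvFirstNZ t else 0) + pvPairs t

lemma pv_foldl_id {α β : Type} (l : List α) (f : β → α → β) (acc : β)
    (h : ∀ (b : β) (x : α), x ∈ l → f b x = b) : l.foldl f acc = acc := by
  induction l generalizing acc with
  | nil => rfl
  | cons x t ih => rw [List.foldl_cons, h acc x (by simp)]; exact ih _ (fun b y hy => h b y (by simp [hy]))

lemma pv_any_eq_not_isEmpty_filter {α : Type} (l : List α) (p : α → Bool) :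
    l.any p = !(l.filter p).isEmpty := by
  induction l with
  | nil => simp
  | cons x t ih => by_cases h : p x <;> simp [h, ih]

-- the validity `any` at row l IS pvDevRow's nonemptiness
lemma pv_any_eq (bank : List String) (n l : Int) :
    ((PySem.List.pyRange 0 n).any (fun j =>
      PySem.Str.pyGet? ((PySem.List.pyGet? bank l).getD "") j == some '1'))
      = !(pvDevRow bank n l).isEmpty := by
  rw [pv_any_eq_not_isEmpty_filter]; rfl

lemma pv_devRow_isEmpty (bank : List String) (nN : Nat)
    (hlen : ∀ row ∈ bank, nN ≤ row.toList.length) (i : Int)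
    (h0 : 0 ≤ i) (hm : i < bank.length) :
    (pvDevRow bank (nN : Int) i).isEmpty
      = decide ((bank.map (pvCnt nN)).getD i.toNat 0 = 0) := by
  have h := pv_devRow_len bank nN hlen i h0 hm
  by_cases he : pvDevRow bank (nN : Int) i = []
  · rw [he] at h ⊢
    simp only [List.length_nil, Nat.cast_zero] at h
    rw [← h]
    simp
  · have hne : (pvDevRow bank (nN : Int) i).length ≠ 0 :=
      fun hz => he (List.length_eq_zero_iff.mp hz)
    have hnz : (bank.map (pvCnt nN)).getD i.toNat 0 ≠ 0 := by omega
    rw [List.isEmpty_eq_false_iff.mpr he]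
    exact (decide_eq_false hnz).symm

-- inner-loop step of A's port (what the k-loop body becomes after zeta reduction)
def pvStep (bank : List String) (n i : Int) : Int → Int → Int := fun laser k =>
  if !(pvDevRow bank n i).isEmpty && !(pvDevRow bank n k).isEmpty then
    if (PySem.List.pyRange (i + 1) k).all (fun l =>
        !((PySem.List.pyRange 0 n).any (fun j =>
          PySem.Str.pyGet? ((PySem.List.pyGet? bank l).getD "") j == some '1')))
    then laser + ((pvDevRow bank n i).length : Int) * ((pvDevRow bank n k).length : Int)
    else laser
  else laser

lemma pv_inner_dead (bank : List String) (nN : Nat)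
    (hlen : ∀ row ∈ bank, nN ≤ row.toList.length) (i a w : Int)
    (hw1 : i < w) (hw2 : w < a) (h0w : 0 ≤ w) (hwm : w < bank.length)
    (hnz : (bank.map (pvCnt nN)).getD w.toNat 0 ≠ 0) (laser : Int) :
    (PySem.List.pyRange a bank.length).foldl (pvStep bank (nN : Int) i) laser = laser := by
  apply pv_foldl_id
  intro b k hk
  rcases PySem.List.mem_pyRange_one.mp hk with ⟨hak, hkm⟩
  have hall : (PySem.List.pyRange (i + 1) k).all (fun l =>
      !((PySem.List.pyRange 0 (nN : Int)).any (fun j =>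
        PySem.Str.pyGet? ((PySem.List.pyGet? bank l).getD "") j == some '1'))) = false := by
    apply List.all_eq_false.mpr
    refine ⟨w, PySem.List.mem_pyRange_one.mpr ⟨by omega, by omega⟩, ?_⟩
    rw [pv_any_eq, pv_devRow_isEmpty bank nN hlen w h0w hwm, decide_eq_false hnz]
    simp
  unfold pvStep
  rw [hall]
  by_cases hc : (!(pvDevRow bank (nN : Int) i).isEmpty
      && !(pvDevRow bank (nN : Int) k).isEmpty) = true
  · rw [if_pos hc, if_neg (by simp)]
  · rw [if_neg hc]

lemma pv_inner_live (bank : List String) (nN : Nat)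
    (hlen : ∀ row ∈ bank, nN ≤ row.toList.length) (i : Int)
    (hi0 : 0 ≤ i) (him : i < bank.length)
    (hiNZ : (bank.map (pvCnt nN)).getD i.toNat 0 ≠ 0) :
    ∀ (fuel : Nat) (a laser : Int), i < a → ((bank.length : Int) - a).toNat ≤ fuel →
    (∀ l : Int, i < l → l < a → (bank.map (pvCnt nN)).getD l.toNat 0 = 0) →
    (PySem.List.pyRange a bank.length).foldl (pvStep bank (nN : Int) i) laser
      = laser + (bank.map (pvCnt nN)).getD i.toNat 0
          * pvFirstNZ ((bank.map (pvCnt nN)).drop a.toNat) := by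
  intro fuel
  induction fuel with
  | zero =>
    intro a laser hia hf _
    rw [PySem.List.pyRange_one_eq_nil (by omega), List.foldl_nil,
      List.drop_eq_nil_of_le (by simp; omega)]
    simp [pvFirstNZ]
  | succ f ih =>
    intro a laser hia hf hzero
    by_cases ham : (bank.length : Int) ≤ a
    · rw [PySem.List.pyRange_one_eq_nil ham, List.foldl_nil,
        List.drop_eq_nil_of_le (by simp; omega)]
      simp [pvFirstNZ]
    · push_neg at ham
      have ha0 : 0 ≤ a := by omega
      have hatoNat : a.toNat < (bank.map (pvCnt nN)).length := by simp; omega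
      have hdrop : (bank.map (pvCnt nN)).drop a.toNat
          = (bank.map (pvCnt nN)).getD a.toNat 0 :: (bank.map (pvCnt nN)).drop (a.toNat + 1) := by
        rw [List.drop_eq_getElem_cons hatoNat, List.getD_eq_getElem _ _ hatoNat]
      have hiempty : (pvDevRow bank (nN : Int) i).isEmpty = false := by
        rw [pv_devRow_isEmpty bank nN hlen i hi0 him]; exact decide_eq_false hiNZ
      rw [PySem.List.pyRange_one_cons ham, List.foldl_cons]
      by_cases hca : (bank.map (pvCnt nN)).getD a.toNat 0 = 0
      · have haempty : (pvDevRow bank (nN : Int) a).isEmpty = true := by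
          rw [pv_devRow_isEmpty bank nN hlen a ha0 (by exact_mod_cast ham)]
          exact decide_eq_true hca
        have hstep : pvStep bank (nN : Int) i laser a = laser := by
          unfold pvStep
          rw [haempty]
          simp
        rw [hstep, ih (a + 1) laser (by omega) (by omega)
          (fun l hl1 hl2 => by
            by_cases hl3 : l < a
            · exact hzero l hl1 hl3
            · have hleq : l = a := by omega
              rw [hleq]; exact hca),
          hdrop, show (a + 1).toNat = a.toNat + 1 by omega]
        have hfz : pvFirstNZ ((bank.map (pvCnt nN)).getD a.toNat 0
            :: (bank.map (pvCnt nN)).drop (a.toNat + 1))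
            = pvFirstNZ ((bank.map (pvCnt nN)).drop (a.toNat + 1)) := by
          simp only [pvFirstNZ]; exact if_neg (not_not_intro hca)
        rw [hfz]
      · have haempty : (pvDevRow bank (nN : Int) a).isEmpty = false := by
          rw [pv_devRow_isEmpty bank nN hlen a ha0 (by exact_mod_cast ham)]
          exact decide_eq_false hca
        have hall : (PySem.List.pyRange (i + 1) a).all (fun l =>
            !((PySem.List.pyRange 0 (nN : Int)).any (fun j =>
              PySem.Str.pyGet? ((PySem.List.pyGet? bank l).getD "") j == some '1'))) = true := by
          apply List.all_eq_true.mpr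
          intro l hl
          rcases PySem.List.mem_pyRange_one.mp hl with ⟨hl1, hl2⟩
          rw [pv_any_eq, pv_devRow_isEmpty bank nN hlen l (by omega) (by omega),
            decide_eq_true (hzero l (by omega) hl2)]
          simp
        have hstep : pvStep bank (nN : Int) i laser a
            = laser + (bank.map (pvCnt nN)).getD i.toNat 0
                * (bank.map (pvCnt nN)).getD a.toNat 0 := by
          unfold pvStep
          rw [hiempty, haempty, hall,
            pv_devRow_len bank nN hlen i hi0 him,
            pv_devRow_len bank nN hlen a ha0 (by exact_mod_cast ham)]
          simp
        rw [hstep,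
          pv_inner_dead bank nN hlen i (a + 1) a (by omega) (by omega) ha0
            (by exact_mod_cast ham) hca, hdrop]
        have hfz : pvFirstNZ ((bank.map (pvCnt nN)).getD a.toNat 0
            :: (bank.map (pvCnt nN)).drop (a.toNat + 1))
            = (bank.map (pvCnt nN)).getD a.toNat 0 := by
          simp only [pvFirstNZ]; exact if_pos hca
        rw [hfz]

lemma pv_outer (bank : List String) (nN : Nat)
    (hlen : ∀ row ∈ bank, nN ≤ row.toList.length) :
    ∀ (fuel : Nat) (a laser : Int), 0 ≤ a → ((bank.length : Int) - a).toNat ≤ fuel →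
    (PySem.List.pyRange a bank.length).foldl (fun laser i =>
        (PySem.List.pyRange (i + 1) (bank.length : Int)).foldl
          (pvStep bank (nN : Int) i) laser) laser
      = laser + pvPairs ((bank.map (pvCnt nN)).drop a.toNat) := by
  intro fuel
  induction fuel with
  | zero =>
    intro a laser ha0 hf
    rw [PySem.List.pyRange_one_eq_nil (by omega), List.foldl_nil,
      List.drop_eq_nil_of_le (by simp; omega)]
    simp [pvPairs]
  | succ f ih =>
    intro a laser ha0 hf
    by_cases ham : (bank.length : Int) ≤ a
    · rw [PySem.List.pyRange_one_eq_nil ham, List.foldl_nil,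
        List.drop_eq_nil_of_le (by simp; omega)]
      simp [pvPairs]
    · push_neg at ham
      have hatoNat : a.toNat < (bank.map (pvCnt nN)).length := by simp; omega
      have hdrop : (bank.map (pvCnt nN)).drop a.toNat
          = (bank.map (pvCnt nN)).getD a.toNat 0 :: (bank.map (pvCnt nN)).drop (a.toNat + 1) := by
        rw [List.drop_eq_getElem_cons hatoNat, List.getD_eq_getElem _ _ hatoNat]
      rw [PySem.List.pyRange_one_cons ham, List.foldl_cons]
      by_cases hca : (bank.map (pvCnt nN)).getD a.toNat 0 = 0
      · have haempty : (pvDevRow bank (nN : Int) a).isEmpty = true := by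
          rw [pv_devRow_isEmpty bank nN hlen a ha0 (by exact_mod_cast ham)]
          exact decide_eq_true hca
        have hstep : (PySem.List.pyRange (a + 1) (bank.length : Int)).foldl
            (pvStep bank (nN : Int) a) laser = laser := by
          apply pv_foldl_id
          intro b k _
          unfold pvStep
          rw [haempty]
          simp
        rw [hstep, ih (a + 1) laser (by omega) (by omega), hdrop,
          show (a + 1).toNat = a.toNat + 1 by omega]
        have hpz : pvPairs ((bank.map (pvCnt nN)).getD a.toNat 0
            :: (bank.map (pvCnt nN)).drop (a.toNat + 1))
            = pvPairs ((bank.map (pvCnt nN)).drop (a.toNat + 1)) := by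
          simp only [pvPairs]
          rw [if_neg (not_not_intro hca)]
          ring
        rw [hpz]
      · rw [pv_inner_live bank nN hlen a ha0 (by exact_mod_cast ham) hca
          ((bank.length : Int) - (a + 1)).toNat (a + 1) laser (by omega) (by omega)
          (fun l hl1 hl2 => absurd rfl (by omega : ¬ (0 : Int) = 0))]
        rw [ih (a + 1) _ (by omega) (by omega), hdrop,
          show (a + 1).toNat = a.toNat + 1 by omega]
        have hpz : pvPairs ((bank.map (pvCnt nN)).getD a.toNat 0
            :: (bank.map (pvCnt nN)).drop (a.toNat + 1))
            = (bank.map (pvCnt nN)).getD a.toNat 0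
                * pvFirstNZ ((bank.map (pvCnt nN)).drop (a.toNat + 1))
              + pvPairs ((bank.map (pvCnt nN)).drop (a.toNat + 1)) := by
          simp only [pvPairs]
          rw [if_pos hca]
        rw [hpz]
        ring

-- B's fold step on the per-row counts
def pvBStep : Int × Int → Int → Int × Int :=
  fun acc c => if c = 0 then acc else (acc.1 + acc.2 * c, c)

lemma pv_b_fold (cs : List Int) : ∀ (t p : Int),
    (cs.foldl pvBStep (t, p)).1 = t + p * pvFirstNZ cs + pvPairs cs := by
  induction cs with
  | nil => simp [pvFirstNZ, pvPairs]
  | cons c t ih =>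
    intro t0 p
    by_cases h : c = 0
    · simp [pvBStep, h, pvFirstNZ, pvPairs, ih]
    · simp only [List.foldl_cons, pvBStep, if_neg h]
      rw [ih]
      simp [pvFirstNZ, pvPairs, h]
      ring

-- B's generator sum over range(n) counts the '1's among the first n characters
lemma pv_b_cnt (row : String) (n : Nat) (hn : n ≤ row.toList.length) :
    ((PySem.List.pyRange 0 (n : Int)).map
      (fun j => if PySem.Str.pyGet? row j == some '1' then (1 : Int) else 0)).sum
      = pvCnt n row := by
  rw [PySem.List.sum_map_ite_one_zero
    (fun j => PySem.Str.pyGet? row j == some '1') (PySem.List.pyRange 0 (n : Int))]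
  rw [List.countP_eq_length_filter]
  have := pv_filter_range_len row.toList n hn
  simp only [PySem.Str.pyGet?_eq, PySem.Chars.pyGet?_eq_listPyGet?] at *
  rw [this]
  rfl

lemma pv_A (bank : List String) (nN : Nat)
    (hlen : ∀ row ∈ bank, nN ≤ row.toList.length)
    (hn : PySem.Str.len ((PySem.List.pyGet? bank 0).getD "") = (nN : Int)) :
    arrange_device bank = pvPairs (bank.map (pvCnt nN)) := by
  rw [show arrange_device bank
      = (PySem.List.pyRange 0 (PySem.List.len bank)).foldl (fun laser i =>
          (PySem.List.pyRange (i + 1) (PySem.List.len bank)).foldl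
            (pvStep bank (PySem.Str.len ((PySem.List.pyGet? bank 0).getD "")) i) laser) 0
    from rfl, hn,
    show PySem.List.len bank = (bank.length : Int) from PySem.List.len_eq bank,
    pv_outer bank nN hlen bank.length 0 0 le_rfl (by omega)]
  simp

lemma pv_B (bank : List String) (nN : Nat)
    (hlen : ∀ row ∈ bank, nN ≤ row.toList.length)
    (hn : PySem.Str.len ((PySem.List.pyGet? bank 0).getD "") = (nN : Int)) :
    arrange_device_alt bank = pvPairs (bank.map (pvCnt nN)) := by
  rw [show arrange_device_alt bank
      = (bank.foldl (fun (acc : Int × Int) row =>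
          let c : Int := ((PySem.List.pyRange 0
            (PySem.Str.len ((PySem.List.pyGet? bank 0).getD ""))).map
            (fun j => if PySem.Str.pyGet? row j == some '1' then (1 : Int) else 0)).sum
          if c ≠ 0 then (acc.1 + acc.2 * c, c) else acc) (0, 0)).1
    from rfl, hn]
  rw [PySem.List.foldl_congr_mem bank _
    (fun (acc : Int × Int) row => pvBStep acc (pvCnt nN row)) (0, 0)
    (fun acc row hrow => by
      show (let c : Int := _; if c ≠ 0 then (acc.1 + acc.2 * c, c) else acc) = _
      simp only [pv_b_cnt row nN (hlen row hrow), pvBStep]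
      by_cases h : pvCnt nN row = 0
      · simp [h]
      · simp [h])]
  rw [show List.foldl (fun (acc : Int × Int) row => pvBStep acc (pvCnt nN row)) (0, 0) bank
      = (bank.map (pvCnt nN)).foldl pvBStep (0, 0) from (List.foldl_map).symm]
  rw [pv_b_fold]
  ring

-- ===== VERDICT (by name: the statement is the Claim_ definition above) =====
theorem arrange_device_spec : Claim_equal_arrange_device := by
  intro bank _hdom hpre
  obtain ⟨hb, hrows⟩ := hpre
  obtain ⟨b0, t, rfl⟩ : ∃ b0 t, bank = b0 :: t := by
    cases bank with
    | nil => exact absurd rfl hb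
    | cons b0 t => exact ⟨b0, t, rfl⟩
  have hn : PySem.Str.len ((PySem.List.pyGet? (b0 :: t) 0).getD "")
      = ((b0.toList.length : Nat) : Int) := by
    rw [PySem.List.pyGet?_zero_cons]
    simp [PySem.Str.len_eq]
  have hlen : ∀ row ∈ b0 :: t, b0.toList.length ≤ row.toList.length := by
    intro row hrow
    have := hrows row hrow
    simp only [List.headD_cons, PySem.Str.len_eq] at this
    exact_mod_cast this
  show arrange_device (b0 :: t) = arrange_device_alt (b0 :: t)
  rw [pv_A (b0 :: t) b0.toList.length hlen hn, pv_B (b0 :: t) b0.toList.length hlen hn]
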